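-- pv_equiv track=rewrite | github.com/andreaperuzzetto/AgentPeXI | apps/backend/agents/recall.py | _group_by_app
-- ===== SOURCE A (Python) =====
-- from collections import defaultdict
--
-- def _group_by_app(results: list[dict]) -> dict[str, list[dict]]:
--     grouped: dict[str, list[dict]] = defaultdict(list)
--     for r in results:
--         app = r.get("metadata", {}).get("app_name", "Sconosciuta")
--         grouped[app].append(r)
--     for app in grouped:
--         grouped[app].sort(key=lambda x: x.get("metadata", {}).get("timestamp", ""))
--     return dict(grouped)
-- ===== SOURCE B (Python) =====
-- def _group_by_app(results: list[dict]) -> dict[str, list[dict]]: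
--     def app_of(r):
--         return r.get("metadata", {}).get("app_name", "Sconosciuta")
--
--     def ts_of(r):
--         return r.get("metadata", {}).get("timestamp", "")
--
--     apps = list(dict.fromkeys(app_of(r) for r in results))
--     return {app: sorted((r for r in results if app_of(r) == app), key=ts_of)
--             for app in apps}
-- ===== Notes on version B (the rewrite author's own statement) =====
-- stated objective: alternative
-- what changed: Instead of building a defaultdict in one appending pass and then sorting each bucket in place, B first deduplicates the app names in first-appearance order and builds the result as a dict comprehension that, per app, filters the original list and sorts the filtered sublist.
import Mathlib
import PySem

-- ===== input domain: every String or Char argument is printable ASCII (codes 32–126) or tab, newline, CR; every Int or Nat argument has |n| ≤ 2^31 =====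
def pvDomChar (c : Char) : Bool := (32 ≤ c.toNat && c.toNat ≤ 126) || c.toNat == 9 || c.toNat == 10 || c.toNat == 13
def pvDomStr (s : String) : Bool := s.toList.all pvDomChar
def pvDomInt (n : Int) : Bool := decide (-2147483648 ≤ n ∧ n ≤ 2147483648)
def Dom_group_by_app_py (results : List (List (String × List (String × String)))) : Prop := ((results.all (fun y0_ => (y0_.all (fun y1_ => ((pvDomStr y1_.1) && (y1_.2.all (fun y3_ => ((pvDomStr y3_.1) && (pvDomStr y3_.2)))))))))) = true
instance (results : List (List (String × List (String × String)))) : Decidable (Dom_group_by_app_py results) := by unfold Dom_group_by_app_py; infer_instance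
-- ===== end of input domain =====

-- B replaces A's appending defaultdict pass + per-bucket in-place sorts by an ordered key
-- dedup followed by a per-key filter-and-sort comprehension (objective: alternative decomposition).

-- shared helpers: r.get("metadata", {}).get("app_name", "Sconosciuta") / .get("timestamp", "")
def pvAppOf (r : List (String × List (String × String))) : String :=
  PySem.Dict.getD (PySem.Dict.mk (PySem.Dict.getD (PySem.Dict.mk r) "metadata" [])) "app_name" "Sconosciuta"
def pvTsOf (r : List (String × List (String × String))) : String :=
  PySem.Dict.getD (PySem.Dict.mk (PySem.Dict.getD (PySem.Dict.mk r) "metadata" [])) "timestamp" ""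

-- ===== PORT A =====
-- 'for r in results: grouped[app].append(r)' on a defaultdict(list) is the modify-fold;
-- 'for app in grouped: grouped[app].sort(key=…)' visits every key once, i.e. sorts every
-- value of the dict in place; dict(grouped) is returned as the items association list.
def group_by_app_py (results : List (List (String × List (String × String)))) : List (String × List (List (String × List (String × String)))) :=
  ((results.foldl (fun d r => d.modify (pvAppOf r) [] (fun lst => lst ++ [r]))
      (PySem.Dict.empty : PySem.Dict String (List (List (String × List (String × String)))))).items).map
    (fun p => (p.1, PySem.List.sorted p.2 pvTsOf false))

-- ===== PORT B =====
def group_by_app_py_alt (results : List (List (String × List (String × String)))) : List (String × List (List (String × List (String × String)))) :=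
  (PySem.List.dedup (results.map pvAppOf)).map (fun app => (app, PySem.List.sorted (results.filter (fun r => pvAppOf r == app)) pvTsOf false))

-- ===== PRECONDITION & SPEC =====
def Spec_group_by_app_py (results : List (List (String × List (String × String)))) (out : List (String × List (List (String × List (String × String))))) : Prop := out = group_by_app_py_alt results
instance (results : List (List (String × List (String × String)))) (out : List (String × List (List (String × List (String × String))))) : Decidable (Spec_group_by_app_py results out) := by
  unfold Spec_group_by_app_py
  -- instance search times out on this nested type; build the DecidableEq term explicitly
  exact @instDecidableEqList _ (@instDecidableEqProd _ _ _ (@instDecidableEqList _ (@instDecidableEqList _ (@instDecidableEqProd _ _ _ (@instDecidableEqList _ instDecidableEqProd))))) out (group_by_app_py_alt results)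

-- ===== CLAIM (what is proved, stated in full; the proofs are below) =====
def Claim_equal_group_by_app_py : Prop := ∀ (results : List (List (String × List (String × String)))), Dom_group_by_app_py results → Spec_group_by_app_py results (group_by_app_py results)

-- ===== LEMMAS AND PROOFS =====

-- the grouping fold, viewed at one key c, collects exactly the filtered records in order
theorem pv_getD_group (results : List (List (String × List (String × String)))) (c : String) :
    (results.foldl (fun d r => d.modify (pvAppOf r) [] (fun lst => lst ++ [r])) PySem.Dict.empty).getD c []
      = results.filter (fun r => pvAppOf r == c) := by
  have h := PySem.Dict.getD_foldl_modify_append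
    (l := results.map (fun r => (pvAppOf r, r)))
    (d := (PySem.Dict.empty : PySem.Dict String (List (List (String × List (String × String)))))) (c := c)
  rw [List.foldl_map] at h
  simpa [PySem.Dict.getD_empty, List.filter_map, Function.comp_def, List.map_map] using h

-- the grouping fold's keys are the app names deduplicated in first-appearance order
theorem pv_keys_group (results : List (List (String × List (String × String)))) :
    (results.foldl (fun d r => d.modify (pvAppOf r) [] (fun lst => lst ++ [r])) PySem.Dict.empty).keys
      = PySem.List.dedup (results.map pvAppOf) := by
  have h := PySem.Dict.keys_foldl_modify_key (l := results) (key := pvAppOf)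
    (d0 := ([] : List (List (String × List (String × String)))))
    (f := fun _ r => (fun lst => lst ++ [r]))
    (d := (PySem.Dict.empty : PySem.Dict String (List (List (String × List (String × String))))))
  simpa [PySem.Dict.keys_empty, PySem.Set.update_empty, PySem.List.dedup_eq_ofList] using h

-- ===== VERDICT (by name: the statement is the Claim_ definition above) =====
theorem group_by_app_py_spec : Claim_equal_group_by_app_py := by
  intro results _
  unfold Spec_group_by_app_py group_by_app_py group_by_app_py_alt
  set grouped := results.foldl (fun d r => d.modify (pvAppOf r) [] (fun lst => lst ++ [r]))
    (PySem.Dict.empty : PySem.Dict String (List (List (String × List (String × String))))) with hg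
  have hnd : grouped.keys.Nodup := by
    rw [hg]
    exact PySem.Dict.nodup_keys_foldl_modify_key _ _ _ _ _ (by simp [PySem.Dict.keys_empty])
  have hitems := PySem.Dict.items_eq_map_keys grouped hnd ([] : List (List (String × List (String × String))))
  rw [hitems, pv_keys_group, List.map_map]
  refine List.map_congr_left ?_
  intro app _
  simp [Function.comp, hg, pv_getD_group]
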